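-- pv_equiv track=rewrite | github.com/KrishnanN27/dp_dummy | eqn.py | T_dp
-- ===== SOURCE A (Python) =====
-- def T_dp(segment_lengths):
--     n = len(segment_lengths)
--     prefix_sum = [0]
--     dp = [[0] * n for _ in range(n)]
--
--     for i, length in enumerate(segment_lengths):
--         prefix_sum.append(prefix_sum[-1] + length)
--         dp[i][i] = length
--
--     for length in range(2, n + 1):
--         for i in range(n - length + 1):
--             j = i + length - 1
--             total_length = prefix_sum[j + 1] - prefix_sum[i]
--             dp[i][j] = total_length - min(dp[i + 1][j], dp[i][j - 1])
--
--     return dp[0][n - 1]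
-- ===== SOURCE B (Python) =====
-- def T_dp(segment_lengths):
--     n = len(segment_lengths)
--     prefix = [0]
--     for x in segment_lengths:
--         prefix.append(prefix[-1] + x)
--     memo = {}
--     stack = [(0, n - 1)]
--     while stack:
--         ij = stack[-1]
--         if ij in memo:
--             stack.pop()
--             continue
--         i, j = ij
--         if i == j:
--             memo[ij] = segment_lengths[i]
--             stack.pop()
--             continue
--         a = memo.get((i + 1, j))
--         b = memo.get((i, j - 1))
--         if a is not None and b is not None:
--             memo[ij] = prefix[j + 1] - prefix[i] - min(a, b)
--             stack.pop()
--         else: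
--             if a is None:
--                 stack.append((i + 1, j))
--             if b is None:
--                 stack.append((i, j - 1))
--     return memo[(0, n - 1)]
-- ===== Notes on version B (the rewrite author's own statement) =====
-- stated objective: alternative
-- what changed: Replaces A's bottom-up length-increasing 2D DP table fill with prefix-sum array by demand-driven top-down memoization: an explicit stack of (i, j) interval subproblems and a memo dict, resolving each interval from its two end-removal children.
import Mathlib
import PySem

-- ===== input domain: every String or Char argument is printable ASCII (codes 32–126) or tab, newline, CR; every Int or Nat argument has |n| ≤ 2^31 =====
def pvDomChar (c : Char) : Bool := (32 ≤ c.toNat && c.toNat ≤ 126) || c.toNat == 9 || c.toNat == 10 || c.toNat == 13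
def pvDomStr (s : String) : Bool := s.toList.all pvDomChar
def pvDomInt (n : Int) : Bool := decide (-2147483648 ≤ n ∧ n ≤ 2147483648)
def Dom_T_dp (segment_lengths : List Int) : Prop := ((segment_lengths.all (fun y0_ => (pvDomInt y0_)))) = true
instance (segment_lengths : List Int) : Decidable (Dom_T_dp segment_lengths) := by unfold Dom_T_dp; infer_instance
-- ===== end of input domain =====

-- B replaces A's bottom-up 2D-table DP by demand-driven top-down memoization: an explicit
-- stack of (i, j) interval subproblems and a memo dict (objective: alternative decomposition).


-- ===== PORT A =====
def T_dp (segment_lengths : List Int) : Int :=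
  let n : Int := segment_lengths.length
  let st := (PySem.List.enumerate segment_lengths).foldl
    (fun (st : List Int × List (List Int)) p =>
      (st.1 ++ [PySem.List.pyGetD st.1 (-1) 0 + p.2],
       PySem.List.pySetD st.2 p.1
         (PySem.List.pySetD (PySem.List.pyGetD st.2 p.1 []) p.1 p.2)))
    ([0], List.replicate segment_lengths.length (List.replicate segment_lengths.length 0))
  let dp := (PySem.List.pyRange 2 (n + 1) 1).foldl (fun dp L =>
    (PySem.List.pyRange 0 (n - L + 1) 1).foldl (fun dp i =>
      let j := i + L - 1
      let total := PySem.List.pyGetD st.1 (j + 1) 0 - PySem.List.pyGetD st.1 i 0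
      PySem.List.pySetD dp i
        (PySem.List.pySetD (PySem.List.pyGetD dp i []) j
          (total - min (PySem.List.pyGetD (PySem.List.pyGetD dp (i + 1) []) j 0)
                       (PySem.List.pyGetD (PySem.List.pyGetD dp i []) (j - 1) 0)))) dp) st.2
  PySem.List.pyGetD (PySem.List.pyGetD dp 0 []) (n - 1) 0

-- ===== PORT B =====
-- the while-loop of Source B: an explicit stack of (i, j) subproblems and a memo dict;
-- the Nat fuel argument only makes the loop total (3 * 2 ^ n iterations are proved
-- sufficient in lemma `resolve` below); Python's loop stops exactly when the stack empties.
def loopB (xs pref : List Int) : Nat → List (Int × Int) → PySem.Dict (Int × Int) Int → PySem.Dict (Int × Int) Int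
  | _, [], memo => memo
  | 0, _ :: _, memo => memo
  | fuel + 1, ij :: rest, memo =>
    if (memo.get? ij).isSome then loopB xs pref fuel rest memo
    else if ij.1 = ij.2 then
      loopB xs pref fuel rest (memo.insert ij (PySem.List.pyGetD xs ij.1 0))
    else
      match memo.get? (ij.1 + 1, ij.2), memo.get? (ij.1, ij.2 - 1) with
      | some a, some b =>
        loopB xs pref fuel rest
          (memo.insert ij
            (PySem.List.pyGetD pref (ij.2 + 1) 0 - PySem.List.pyGetD pref ij.1 0 - min a b))
      | oa, ob =>
        loopB xs pref fuel
          ((if ob = none then [(ij.1, ij.2 - 1)] else [])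
            ++ (if oa = none then [(ij.1 + 1, ij.2)] else []) ++ ij :: rest) memo

def T_dp_alt (segment_lengths : List Int) : Int :=
  let n : Int := segment_lengths.length
  let pref := segment_lengths.foldl
    (fun pr x => pr ++ [PySem.List.pyGetD pr (-1) 0 + x]) [0]
  let memo := loopB segment_lengths pref (3 * 2 ^ segment_lengths.length)
    [(0, n - 1)] PySem.Dict.empty
  memo.getD (0, n - 1) 0

-- ===== PRECONDITION & SPEC =====
-- Pre_ excludes only the empty list, on which A raises IndexError (dp[0][n - 1] on an empty dp).
def Pre_T_dp (segment_lengths : List Int) : Prop := segment_lengths ≠ []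
instance (segment_lengths : List Int) : Decidable (Pre_T_dp segment_lengths) := by unfold Pre_T_dp; infer_instance
def pvWitness_T_dp : List Int := [3, 9, 1, 2]

def Spec_T_dp (segment_lengths : List Int) (out : Int) : Prop := out = T_dp_alt segment_lengths
instance (segment_lengths : List Int) (out : Int) : Decidable (Spec_T_dp segment_lengths out) := by unfold Spec_T_dp; infer_instance

-- ===== CLAIM (what is proved, stated in full; the proofs are below) =====
def Claim_equal_T_dp : Prop := ∀ (segment_lengths : List Int), Dom_T_dp segment_lengths → Pre_T_dp segment_lengths → Spec_T_dp segment_lengths (T_dp segment_lengths)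

-- ===== LEMMAS AND PROOFS =====

-- the game value of the interval [i, j] (the common spec of both programs)
def gval (xs : List Int) (i j : Nat) : Int :=
  if i = j then xs.getD i 0
  else if _h : i < j then
    ((xs.take (j + 1)).sum - (xs.take i).sum)
      - min (gval xs (i + 1) j) (gval xs i (j - 1))
  else 0
termination_by j - i
decreasing_by all_goals omega
def prefL (xs : List Int) : List Int :=
  (List.range (xs.length + 1)).map (fun k => (xs.take k).sum)
lemma prefL_get (xs : List Int) (k : Int) (h0 : 0 ≤ k) (h : k ≤ (xs.length : Int)) :
    PySem.List.pyGetD (prefL xs) k 0 = (xs.take k.toNat).sum := by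
  have hk : k = ((k.toNat : Nat) : Int) := by omega
  rw [hk, PySem.List.pyGetD_natCast]
  unfold prefL
  rw [PySem.List.getD_map_range _ _ _ _ (by omega)]
  simp [max_eq_left h0]
lemma pref_go : ∀ (ys : List Int) (pr : List Int) (c : Int),
    PySem.List.pyGetD pr (-1) 0 = c →
    ys.foldl (fun pr x => pr ++ [PySem.List.pyGetD pr (-1) 0 + x]) pr
      = pr ++ (List.range ys.length).map (fun k => c + (ys.take (k + 1)).sum) := by
  intro ys
  induction ys with
  | nil => intro pr c _; simp
  | cons y t ih =>
    intro pr c hc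
    simp only [List.foldl_cons, hc]
    rw [ih (pr ++ [c + y]) (c + y) (PySem.List.pyGetD_neg_one_append_singleton ..)]
    simp only [List.length_cons, List.range_succ_eq_map, List.map_cons, List.map_map,
      List.take_succ_cons, List.sum_cons, List.append_assoc, List.singleton_append]
    congr 1
    congr 1
    · simp
    · refine List.map_congr_left ?_
      intro k _
      simp [Function.comp]
      ring
lemma pref_fold (xs : List Int) :
    xs.foldl (fun pr x => pr ++ [PySem.List.pyGetD pr (-1) 0 + x]) [0] = prefL xs := by
  rw [pref_go xs [0] 0 (by decide)]
  unfold prefL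
  simp only [List.range_succ_eq_map, List.map_cons, List.map_map]
  simp [Function.comp]

def tbl (F : Nat → Nat → Int) (n : Nat) : List (List Int) :=
  (List.range n).map (fun i => (List.range n).map (fun j => F i j))

lemma tbl_get (F : Nat → Nat → Int) (n i j : Nat) (hi : i < n) (hj : j < n) :
    PySem.List.pyGetD (PySem.List.pyGetD (tbl F n) (i : Int) []) (j : Int) 0 = F i j := by
  unfold tbl
  rw [PySem.List.pyGetD_natCast, PySem.List.pyGetD_natCast,
      PySem.List.getD_map_range _ _ _ _ hi, PySem.List.getD_map_range _ _ _ _ hj]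

lemma tbl_congr {F G : Nat → Nat → Int} (n : Nat)
    (h : ∀ a b, a < n → b < n → F a b = G a b) : tbl F n = tbl G n := by
  unfold tbl
  refine List.map_congr_left ?_
  intro a ha
  refine List.map_congr_left ?_
  intro b hb
  exact h a b (List.mem_range.mp ha) (List.mem_range.mp hb)

lemma tbl_zero (n : Nat) :
    List.replicate n (List.replicate n (0 : Int)) = tbl (fun _ _ => 0) n := by
  unfold tbl
  simp [List.map_const']

lemma tbl_set (F : Nat → Nat → Int) (n i j : Nat) (hi : i < n) (hj : j < n) (v : Int) :
    PySem.List.pySetD (tbl F n) (i : Int)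
        (PySem.List.pySetD (PySem.List.pyGetD (tbl F n) (i : Int) []) (j : Int) v)
      = tbl (fun a b => if a = i ∧ b = j then v else F a b) n := by
  unfold tbl
  rw [PySem.List.pyGetD_natCast, PySem.List.getD_map_range _ _ _ _ hi,
      PySem.List.pySetD_natCast, PySem.List.pySetD_natCast]
  apply List.ext_getElem
  · simp
  intro a ha1 ha2
  rw [List.getElem_set]
  simp only [List.getElem_map, List.getElem_range]
  by_cases hai : i = a
  · subst hai
    rw [if_pos rfl]
    apply List.ext_getElem
    · simp
    intro b hb1 hb2
    rw [List.getElem_set]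
    simp only [List.getElem_map, List.getElem_range]
    by_cases hbj : j = b
    · subst hbj; simp
    · rw [if_neg hbj]; simp [Ne.symm hbj]
  · rw [if_neg hai]
    simp [Ne.symm hai]

lemma diag_go (xs : List Int) (n : Nat) (hn : xs.length = n) :
    ∀ (ys : List Int) (s : Nat) (F : Nat → Nat → Int),
    s + ys.length = n →
    (∀ k, k < ys.length → ys.getD k 0 = xs.getD (s + k) 0) →
    (PySem.List.enumerate ys (s : Int)).foldl
        (fun dp (p : Int × Int) =>
          PySem.List.pySetD dp p.1
            (PySem.List.pySetD (PySem.List.pyGetD dp p.1 []) p.1 p.2)) (tbl F n)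
      = tbl (fun a b => if a = b ∧ s ≤ a then xs.getD a 0 else F a b) n := by
  intro ys
  induction ys with
  | nil =>
    intro s F hs _
    simp only [PySem.List.enumerate_nil, List.foldl_nil]
    refine tbl_congr n ?_
    intro a b ha hb
    rw [if_neg]
    simp at hs
    omega
  | cons y t ih =>
    intro s F hs hval
    have hsn : s < n := by simp at hs; omega
    rw [PySem.List.enumerate_cons, List.foldl_cons]
    have hcast : ((s : Int) + 1) = (((s + 1 : Nat)) : Int) := by push_cast; ring
    rw [show ((s:Int),y).1 = (s:Int) from rfl]
    rw [tbl_set F n s s hsn hsn y, hcast,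
        ih (s+1) _ (by simp at hs ⊢; omega)
          (fun k hk => by have := hval (k+1) (by simp at hs ⊢; omega); simpa [show s+(k+1)=s+1+k by omega] using this)]
    refine tbl_congr n ?_
    intro a b ha hb
    by_cases h1 : a = b ∧ s + 1 ≤ a
    · rw [if_pos h1, if_pos ⟨h1.1, by omega⟩]
    · rw [if_neg h1]
      by_cases h2 : a = s ∧ b = s
      · rw [if_pos h2, if_pos ⟨by omega, by omega⟩]
        have := hval 0 (by simp)
        simp at this
        simp only [List.getD, h2.1]
        exact this
      · rw [if_neg h2, if_neg (by omega)]

def Fupto (xs : List Int) (L : Nat) : Nat → Nat → Int :=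
  fun a b => if a ≤ b ∧ b + 1 - a ≤ L then gval xs a b else 0
def Fpart (xs : List Int) (L t : Nat) : Nat → Nat → Int :=
  fun a b => if a ≤ b ∧ (b + 1 - a ≤ L - 1 ∨ (b + 1 - a = L ∧ a < t)) then gval xs a b else 0
lemma inner_go (xs : List Int) (n L : Nat) (hn : xs.length = n) (hL2 : 2 ≤ L) (hLn : L ≤ n) :
    ∀ t : Nat, t ≤ n - L + 1 →
    (PySem.List.pyRange 0 (t : Int) 1).foldl
        (fun dp i =>
          let j := i + (L : Int) - 1
          let total := PySem.List.pyGetD (prefL xs) (j + 1) 0 - PySem.List.pyGetD (prefL xs) i 0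
          PySem.List.pySetD dp i
            (PySem.List.pySetD (PySem.List.pyGetD dp i []) j
              (total - min (PySem.List.pyGetD (PySem.List.pyGetD dp (i + 1) []) j 0)
                           (PySem.List.pyGetD (PySem.List.pyGetD dp i []) (j - 1) 0))))
        (tbl (Fupto xs (L - 1)) n)
      = tbl (Fpart xs L t) n := by
  intro t
  induction t with
  | zero =>
    intro _
    rw [show ((0:Nat):Int) = 0 from rfl, PySem.List.pyRange_one_eq_nil (by omega), List.foldl_nil]
    refine tbl_congr n ?_
    intro a b _ _
    unfold Fupto Fpart
    exact if_congr (by omega) rfl rfl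
  | succ t ih =>
    intro ht
    have hstep : ((t+1 : Nat) : Int) = (t : Int) + 1 := by push_cast; ring
    rw [hstep, PySem.List.pyRange_one_succ_right (by positivity), List.foldl_append,
        ih (by omega), List.foldl_cons, List.foldl_nil]
    simp only []
    -- name the Nat end index
    have hjN : (t : Int) + (L : Int) - 1 = ((t + L - 1 : Nat) : Int) := by push_cast; omega
    have hj1 : ((t + L - 1 : Nat) : Int) + 1 = ((t + L : Nat) : Int) := by push_cast; omega
    have hjm1 : ((t + L - 1 : Nat) : Int) - 1 = ((t + L - 2 : Nat) : Int) := by push_cast; omega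
    have hi1 : (t : Int) + 1 = ((t + 1 : Nat) : Int) := by push_cast; ring
    rw [hjN, hj1, hjm1, hi1,
        prefL_get xs _ (by positivity) (by push_cast; omega),
        prefL_get xs _ (by positivity) (by push_cast; omega),
        tbl_get _ n (t+1) (t+L-1) (by omega) (by omega),
        tbl_get _ n t (t+L-2) (by omega) (by omega),
        tbl_set _ n t (t+L-1) (by omega) (by omega)]
    refine tbl_congr n ?_
    intro a b ha hb
    by_cases hab : a = t ∧ b = t + L - 1
    · rw [if_pos hab]
      obtain ⟨rfl, rfl⟩ := hab
      have r0 : Fpart xs L (a+1) a (a+L-1) = gval xs a (a+L-1) := by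
        unfold Fpart; rw [if_pos ⟨by omega, Or.inr ⟨by omega, by omega⟩⟩]
      have r1 : Fpart xs L a (a+1) (a+L-1) = gval xs (a+1) (a+L-1) := by
        unfold Fpart; rw [if_pos ⟨by omega, Or.inl (by omega)⟩]
      have r2 : Fpart xs L a a (a+L-2) = gval xs a (a+L-2) := by
        unfold Fpart; rw [if_pos ⟨by omega, Or.inl (by omega)⟩]
      have hg : gval xs a (a+L-1)
          = ((xs.take (a+L-1+1)).sum - (xs.take a).sum)
            - min (gval xs (a+1) (a+L-1)) (gval xs a (a+L-1-1)) := by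
        rw [gval, if_neg (by omega), dif_pos (by omega)]
      rw [r0, r1, r2, hg]
      rw [show a+L-1+1 = a+L by omega, show a+L-1-1 = a+L-2 by omega]
      rw [show ((a + L : Nat) : Int).toNat = a + L from by omega,
          show ((a : Nat) : Int).toNat = a from by omega]
    · rw [if_neg hab]
      unfold Fpart
      exact if_congr (by omega) rfl rfl

lemma outer_go (xs : List Int) (n : Nat) (hn : xs.length = n) :
    ∀ L : Nat, 1 ≤ L → L ≤ n →
    (PySem.List.pyRange 2 ((L : Int) + 1) 1).foldl
        (fun dp Li =>
          (PySem.List.pyRange 0 ((n : Int) - Li + 1) 1).foldl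
            (fun dp i =>
              let j := i + Li - 1
              let total := PySem.List.pyGetD (prefL xs) (j + 1) 0 - PySem.List.pyGetD (prefL xs) i 0
              PySem.List.pySetD dp i
                (PySem.List.pySetD (PySem.List.pyGetD dp i []) j
                  (total - min (PySem.List.pyGetD (PySem.List.pyGetD dp (i + 1) []) j 0)
                               (PySem.List.pyGetD (PySem.List.pyGetD dp i []) (j - 1) 0)))) dp)
        (tbl (Fupto xs 1) n)
      = tbl (Fupto xs L) n := by
  intro L
  induction L with
  | zero => omega
  | succ L ih =>
    intro _ hLe
    by_cases hL1 : L = 0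
    · subst hL1
      rw [show (((1:Nat) : Int) + 1) = 2 from by norm_num, PySem.List.pyRange_one_eq_nil (by omega),
          List.foldl_nil]
    · rw [show (((L+1:Nat) : Int) + 1) = ((L:Int) + 1) + 1 from by push_cast; ring,
          PySem.List.pyRange_one_succ_right (by omega : (2:Int) ≤ (L:Int) + 1),
          List.foldl_append, ih (by omega) (by omega), List.foldl_cons, List.foldl_nil]
      have H := inner_go xs n (L+1) hn (by omega) (by omega) (n-(L+1)+1) (by omega)
      simp only [Nat.add_sub_cancel] at H
      rw [show ((n-(L+1)+1 : Nat) : Int) = (n : Int) - ((L:Int)+1) + 1 from by push_cast [Nat.cast_sub (by omega : L+1 ≤ n)]; ring] at H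
      simp only [show ((L+1 : Nat) : Int) = (L:Int)+1 from by push_cast; ring] at H
      rw [H]
      refine tbl_congr n ?_
      intro a b ha hb
      unfold Fpart Fupto
      exact if_congr (by omega) rfl rfl

lemma gval_diag (xs : List Int) (a : Nat) : gval xs a a = xs.getD a 0 := by
  rw [gval]; simp

lemma A_val (xs : List Int) (hx : xs ≠ []) : T_dp xs = gval xs 0 (xs.length - 1) := by
  have hn1 : 1 ≤ xs.length := List.length_pos_iff.mpr hx
  unfold T_dp
  simp only []
  rw [PySem.List.foldl_prod_mk
        (fun pr (p : Int × Int) => pr ++ [PySem.List.pyGetD pr (-1) 0 + p.2])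
        (fun dp (p : Int × Int) => PySem.List.pySetD dp p.1
          (PySem.List.pySetD (PySem.List.pyGetD dp p.1 []) p.1 p.2))]
  -- first component: the prefix-sum loop
  have h1 : (PySem.List.enumerate xs).foldl
      (fun pr (p : Int × Int) => pr ++ [PySem.List.pyGetD pr (-1) 0 + p.2]) [0] = prefL xs := by
    calc (PySem.List.enumerate xs).foldl
          (fun pr (p : Int × Int) => pr ++ [PySem.List.pyGetD pr (-1) 0 + p.2]) [0]
        = ((PySem.List.enumerate xs).map (·.2)).foldl
            (fun pr x => pr ++ [PySem.List.pyGetD pr (-1) 0 + x]) [0] := by rw [List.foldl_map]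
      _ = prefL xs := by rw [PySem.List.map_snd_enumerate, pref_fold]
  -- second component: the diagonal table
  have h2 : (PySem.List.enumerate xs).foldl
      (fun dp (p : Int × Int) =>
        PySem.List.pySetD dp p.1
          (PySem.List.pySetD (PySem.List.pyGetD dp p.1 []) p.1 p.2))
      (List.replicate xs.length (List.replicate xs.length (0:Int)))
      = tbl (Fupto xs 1) xs.length := by
    rw [tbl_zero]
    have := diag_go xs xs.length rfl xs 0 (fun _ _ => 0) (by omega) (fun k hk => by simp)
    simp only [Nat.cast_zero] at this
    rw [this]
    refine tbl_congr xs.length ?_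
    intro a b ha hb
    unfold Fupto
    by_cases hab : a = b
    · subst hab; rw [if_pos ⟨rfl, by omega⟩, if_pos ⟨by omega, by omega⟩, gval_diag]
    · rw [if_neg (by omega), if_neg (by omega)]
  rw [h1, h2]
  have := outer_go xs xs.length rfl xs.length (by omega) (le_refl _)
  rw [this]
  have hfin : PySem.List.pyGetD (PySem.List.pyGetD (tbl (Fupto xs xs.length) xs.length) 0 [])
      ((xs.length : Int) - 1) 0 = Fupto xs xs.length 0 (xs.length - 1) := by
    have h := tbl_get (Fupto xs xs.length) xs.length 0 (xs.length - 1) (by omega) (by omega)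
    rw [show ((xs.length - 1 : Nat) : Int) = (xs.length : Int) - 1 from by
          push_cast [Nat.cast_sub hn1]; ring] at h
    simpa using h
  rw [hfin]
  unfold Fupto
  rw [if_pos ⟨by omega, by omega⟩]

lemma loopB_nil (xs pref : List Int) (fuel : Nat) (memo : PySem.Dict (Int × Int) Int) :
    loopB xs pref fuel [] memo = memo := by
  cases fuel <;> rw [loopB]

lemma loopB_cons (xs pref : List Int) (fuel : Nat) (ij : Int × Int) (rest : List (Int × Int))
    (memo : PySem.Dict (Int × Int) Int) :
    loopB xs pref (fuel + 1) (ij :: rest) memo =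
    if (memo.get? ij).isSome then loopB xs pref fuel rest memo
    else if ij.1 = ij.2 then
      loopB xs pref fuel rest (memo.insert ij (PySem.List.pyGetD xs ij.1 0))
    else
      match memo.get? (ij.1 + 1, ij.2), memo.get? (ij.1, ij.2 - 1) with
      | some a, some b =>
        loopB xs pref fuel rest
          (memo.insert ij
            (PySem.List.pyGetD pref (ij.2 + 1) 0 - PySem.List.pyGetD pref ij.1 0 - min a b))
      | oa, ob =>
        loopB xs pref fuel
          ((if ob = none then [(ij.1, ij.2 - 1)] else [])
            ++ (if oa = none then [(ij.1 + 1, ij.2)] else []) ++ ij :: rest) memo := by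
  rw [loopB]

def Good (xs : List Int) (memo : PySem.Dict (Int × Int) Int) : Prop :=
  ∀ p v, memo.get? p = some v → v = gval xs p.1.toNat p.2.toNat

def DExt (m m' : PySem.Dict (Int × Int) Int) : Prop :=
  ∀ p v, m.get? p = some v → m'.get? p = some v

lemma dext_refl (m : PySem.Dict (Int × Int) Int) : DExt m m := fun _ _ h => h

lemma dext_trans {m1 m2 m3 : PySem.Dict (Int × Int) Int} (h1 : DExt m1 m2) (h2 : DExt m2 m3) :
    DExt m1 m3 := fun p v h => h2 p v (h1 p v h)

lemma dext_insert (m : PySem.Dict (Int × Int) Int) (k : Int × Int) (v : Int)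
    (hk : m.get? k = none) : DExt m (m.insert k v) := by
  intro p w hw
  rw [PySem.Dict.get?_insert]
  split_ifs with hpk
  · subst hpk; rw [hk] at hw; cases hw
  · exact hw

lemma good_insert (xs : List Int) (m : PySem.Dict (Int × Int) Int) (k : Int × Int) (v : Int)
    (hm : Good xs m) (hv : v = gval xs k.1.toNat k.2.toNat) : Good xs (m.insert k v) := by
  intro p w hw
  rw [PySem.Dict.get?_insert] at hw
  split_ifs at hw with hpk
  · cases hw; subst hpk; exact hv
  · exact hm p w hw

lemma good_empty (xs : List Int) : Good xs PySem.Dict.empty := by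
  intro p v h
  rw [PySem.Dict.get?_empty] at h
  cases h

lemma finish_step (xs : List Int) (i j : Int) (a b : Int) (rest : List (Int × Int))
    (memo : PySem.Dict (Int × Int) Int) (f : Nat)
    (hGood : Good xs memo) (h0 : 0 ≤ i) (hij : i < j) (hjn : j < (xs.length : Int))
    (ha : memo.get? (i + 1, j) = some a) (hb : memo.get? (i, j - 1) = some b) :
    ∃ memo', loopB xs (prefL xs) (f + 1) ((i, j) :: rest) memo
        = loopB xs (prefL xs) f rest memo'
      ∧ Good xs memo' ∧ DExt memo memo'
      ∧ memo'.get? (i, j) = some (gval xs i.toNat j.toNat) := by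
  rw [loopB_cons]
  by_cases hm : (memo.get? (i, j)).isSome
  · obtain ⟨v, hv⟩ := Option.isSome_iff_exists.mp hm
    refine ⟨memo, by rw [if_pos hm], hGood, dext_refl memo, ?_⟩
    rw [hv, hGood _ _ hv]
  · have hmn : memo.get? (i, j) = none := Option.not_isSome_iff_eq_none.mp hm
    rw [if_neg hm, if_neg (show ¬ ((i, j).1 = (i, j).2) from by simp; omega)]
    rw [ha, hb]
    have hval : PySem.List.pyGetD (prefL xs) (j + 1) 0 - PySem.List.pyGetD (prefL xs) i 0 - min a b
        = gval xs i.toNat j.toNat := by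
      rw [prefL_get xs (j + 1) (by omega) (by omega), prefL_get xs i (by omega) (by omega),
          hGood _ _ ha, hGood _ _ hb]
      conv_rhs => rw [gval]
      rw [if_neg (by omega), dif_pos (by omega)]
      rw [show (j + 1).toNat = j.toNat + 1 from by omega,
          show (i + 1).toNat = i.toNat + 1 from by omega,
          show (j - 1).toNat = j.toNat - 1 from by omega]
    refine ⟨memo.insert (i, j) _, rfl, good_insert xs memo _ _ hGood (by simpa using hval),
      dext_insert memo _ _ hmn, ?_⟩
    rw [PySem.Dict.get?_insert_self, hval]

lemma resolve (xs : List Int) :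
    ∀ (g : Nat) (i j : Int) (rest : List (Int × Int)) (memo : PySem.Dict (Int × Int) Int)
      (fuel : Nat),
    Good xs memo → 0 ≤ i → i ≤ j → j < (xs.length : Int) → (j - i).toNat = g →
    3 * 2 ^ g - 2 ≤ fuel →
    ∃ (k : Nat) (memo' : PySem.Dict (Int × Int) Int),
      k ≤ 3 * 2 ^ g - 2 ∧ k ≤ fuel ∧
      loopB xs (prefL xs) fuel ((i, j) :: rest) memo
        = loopB xs (prefL xs) (fuel - k) rest memo' ∧
      Good xs memo' ∧ DExt memo memo' ∧
      memo'.get? (i, j) = some (gval xs i.toNat j.toNat) := by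
  intro g
  induction g using Nat.strong_induction_on with
  | _ g IH =>
  intro i j rest memo fuel hGood h0 hij hjn hg hfuel
  have h2g : (1:Nat) ≤ 2 ^ g := Nat.one_le_two_pow
  obtain ⟨f, rfl⟩ : ∃ f, fuel = f + 1 := ⟨fuel - 1, by omega⟩
  by_cases hm : (memo.get? (i, j)).isSome
  · obtain ⟨v, hv⟩ := Option.isSome_iff_exists.mp hm
    refine ⟨1, memo, by omega, by omega, ?_, hGood, dext_refl memo,
      by rw [hv, hGood _ _ hv]⟩
    rw [loopB_cons, if_pos hm]
    norm_num
  · have hmn := Option.not_isSome_iff_eq_none.mp hm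
    by_cases hij2 : i = j
    · subst hij2
      refine ⟨1, memo.insert (i, i) (PySem.List.pyGetD xs i 0), by omega, by omega, ?_,
        good_insert xs memo _ _ hGood ?_, dext_insert _ _ _ hmn, ?_⟩
      · rw [loopB_cons, if_neg hm, if_pos rfl]
        norm_num
      · rw [gval_diag, PySem.List.pyGetD_eq_getElem xs 0 h0 (by omega)]
        simp [List.getD, List.getElem?_eq_getElem (show i.toNat < xs.length from by omega)]
      · rw [PySem.Dict.get?_insert_self, gval_diag,
            PySem.List.pyGetD_eq_getElem xs 0 h0 (by omega)]
        simp [List.getD, List.getElem?_eq_getElem (show i.toNat < xs.length from by omega)]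
    · have hlt : i < j := lt_of_le_of_ne hij hij2
      have hg1 : 1 ≤ g := by omega
      have hpow : (2:Nat) ^ g = 2 * 2 ^ (g - 1) := by
        conv_lhs => rw [show g = (g - 1) + 1 from by omega]
        rw [pow_succ]; ring
      have hcgb : (j - 1 - i).toNat = g - 1 := by omega
      have hcga : (j - (i + 1)).toNat = g - 1 := by omega
      rcases ha : memo.get? (i + 1, j) with _ | a <;> rcases hb : memo.get? (i, j - 1) with _ | b
      · -- both children missing: push both, resolve each, then finish
        obtain ⟨k1, m1, hk1, hk1f, heq1, hG1, hE1, hv1⟩ :=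
          IH (g - 1) (by omega) i (j - 1) ((i + 1, j) :: (i, j) :: rest) memo f
            hGood h0 (by omega) (by omega) hcgb (by omega)
        obtain ⟨k2, m2, hk2, hk2f, heq2, hG2, hE2, hv2⟩ :=
          IH (g - 1) (by omega) (i + 1) j ((i, j) :: rest) m1 (f - k1)
            hG1 (by omega) (by omega) hjn hcga (by omega)
        obtain ⟨f2, hf2⟩ : ∃ f2, f - k1 - k2 = f2 + 1 := ⟨f - k1 - k2 - 1, by omega⟩
        obtain ⟨m3, heq3, hG3, hE3, hv3⟩ :=
          finish_step xs i j _ _ rest m2 f2 hG2 h0 hlt hjn hv2 (hE2 _ _ hv1)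
        refine ⟨k1 + k2 + 2, m3, by omega, by omega, ?_, hG3,
          dext_trans (dext_trans hE1 (dext_trans hE2 hE3)) (dext_refl m3), hv3⟩
        rw [loopB_cons, if_neg hm, if_neg hij2]
        simp only [ha, hb, reduceCtorEq, reduceIte, List.nil_append, List.singleton_append,
          List.cons_append]
        rw [heq1, heq2, hf2, heq3, show f + 1 - (k1 + k2 + 2) = f2 from by omega]
      · -- only (i+1, j) missing
        obtain ⟨k1, m1, hk1, hk1f, heq1, hG1, hE1, hv1⟩ :=
          IH (g - 1) (by omega) (i + 1) j ((i, j) :: rest) memo f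
            hGood (by omega) (by omega) hjn hcga (by omega)
        obtain ⟨f2, hf2⟩ : ∃ f2, f - k1 = f2 + 1 := ⟨f - k1 - 1, by omega⟩
        obtain ⟨m3, heq3, hG3, hE3, hv3⟩ :=
          finish_step xs i j _ b rest m1 f2 hG1 h0 hlt hjn hv1
            (by rw [hE1 _ _ hb, hGood _ _ hb])
        refine ⟨k1 + 2, m3, by omega, by omega, ?_, hG3,
          dext_trans hE1 hE3, hv3⟩
        rw [loopB_cons, if_neg hm, if_neg hij2]
        simp only [ha, hb, reduceCtorEq, reduceIte, List.nil_append, List.singleton_append,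
          List.cons_append]
        rw [heq1, hf2, heq3, show f + 1 - (k1 + 2) = f2 from by omega]
      · -- only (i, j-1) missing
        obtain ⟨k1, m1, hk1, hk1f, heq1, hG1, hE1, hv1⟩ :=
          IH (g - 1) (by omega) i (j - 1) ((i, j) :: rest) memo f
            hGood h0 (by omega) (by omega) hcgb (by omega)
        obtain ⟨f2, hf2⟩ : ∃ f2, f - k1 = f2 + 1 := ⟨f - k1 - 1, by omega⟩
        obtain ⟨m3, heq3, hG3, hE3, hv3⟩ :=
          finish_step xs i j a _ rest m1 f2 hG1 h0 hlt hjn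
            (by rw [hE1 _ _ ha, hGood _ _ ha]) hv1
        refine ⟨k1 + 2, m3, by omega, by omega, ?_, hG3,
          dext_trans hE1 hE3, hv3⟩
        rw [loopB_cons, if_neg hm, if_neg hij2]
        simp only [ha, hb, reduceCtorEq, reduceIte, List.nil_append, List.singleton_append,
          List.cons_append]
        rw [heq1, hf2, heq3, show f + 1 - (k1 + 2) = f2 from by omega]
      · -- both children present
        obtain ⟨m3, heq3, hG3, hE3, hv3⟩ :=
          finish_step xs i j a b rest memo f hGood h0 hlt hjn ha hb
        exact ⟨1, m3, by omega, by omega, by rw [heq3]; norm_num, hG3, hE3, hv3⟩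

lemma B_val (xs : List Int) (hx : xs ≠ []) : T_dp_alt xs = gval xs 0 (xs.length - 1) := by
  have hn1 : 1 ≤ xs.length := List.length_pos_iff.mpr hx
  unfold T_dp_alt
  simp only []
  rw [pref_fold]
  have hT : (((xs.length : Int) - 1) - 0).toNat = xs.length - 1 := by omega
  obtain ⟨k, memo', _, _, heq, _, _, hget⟩ :=
    resolve xs ((((xs.length : Int) - 1) - 0).toNat) 0 ((xs.length : Int) - 1) []
      PySem.Dict.empty (3 * 2 ^ xs.length) (good_empty xs) le_rfl (by omega)
      (by omega) rfl
      (by rw [hT]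
          have := Nat.pow_le_pow_right (show 1 ≤ 2 from by norm_num)
            (show xs.length - 1 ≤ xs.length from by omega)
          omega)
  rw [heq, loopB_nil, PySem.Dict.getD_of_get?_eq_some memo' 0 hget,
      show ((0 : Int)).toNat = 0 from rfl,
      show (((xs.length : Int) - 1)).toNat = xs.length - 1 from by omega]

-- ===== VERDICT (by name: the statement is the Claim_ definition above) =====
theorem T_dp_spec : Claim_equal_T_dp := by
  intro xs _ hpre
  unfold Spec_T_dp
  rw [A_val xs hpre, B_val xs hpre]
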